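-- pv_equiv track=rewrite | github.com/sinnl/backup_file_sorter | file_sorter.py | generate_backup_dict
-- ===== SOURCE A (Python) =====
-- def generate_backup_dict(all_backups):
--     tmp_backup_dict, out = {}, {}
--     backup_dates = [x.split('_')[-1] for x in all_backups]
--
--     for item in backup_dates:
--         backup_date = item[:8]
--         backup_time = item[8:12]
--         if backup_date in tmp_backup_dict.keys():
--             tmp_backup_dict[backup_date].append(backup_time)
--         else:
--             tmp_backup_dict[backup_date] = [backup_time]
--
--     for key, values in tmp_backup_dict.items():
--         out.update({key: sorted(values)})
--
--     return out
-- ===== SOURCE B (Python) =====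
-- def generate_backup_dict(all_backups):
--     items = [x.split('_')[-1] for x in all_backups]
--     dates = list(dict.fromkeys(item[:8] for item in items))
--     return {d: sorted(item[8:12] for item in items if item[:8] == d)
--             for d in dates}
-- ===== Notes on version B (the rewrite author's own statement) =====
-- stated objective: alternative
-- what changed: Instead of one pass that grows per-date lists in a dict and a second pass that sorts each list, B first computes the distinct dates in order of first appearance (dict.fromkeys) and then builds each group directly with a filtered comprehension over the items, sorted once.
import Mathlib
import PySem

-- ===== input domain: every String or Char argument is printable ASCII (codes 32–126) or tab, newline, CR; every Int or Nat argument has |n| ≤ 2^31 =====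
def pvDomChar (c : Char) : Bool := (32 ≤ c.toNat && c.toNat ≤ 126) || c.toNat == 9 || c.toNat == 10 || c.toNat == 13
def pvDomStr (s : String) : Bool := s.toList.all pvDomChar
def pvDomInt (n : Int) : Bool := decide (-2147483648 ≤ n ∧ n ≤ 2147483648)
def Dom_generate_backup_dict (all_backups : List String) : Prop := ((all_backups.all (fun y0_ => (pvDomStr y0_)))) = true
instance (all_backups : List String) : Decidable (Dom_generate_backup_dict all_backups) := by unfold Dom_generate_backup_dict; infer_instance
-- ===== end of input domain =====

-- B builds each date's group directly (distinct dates first, then one filtered scan per date) instead of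
-- A's dict-of-growing-lists pass followed by a per-key sorting pass; same return value, no speed claim.

-- shared helper: x.split('_')[-1] (split? is never none for the nonempty separator and the resulting
-- list is never empty, so the two .getD defaults are unreachable)
def pvLastSeg (x : String) : String :=
  (PySem.List.pyGet? ((PySem.Str.split? x "_").getD []) (-1)).getD ""

-- ===== PORT A =====
def generate_backup_dict (all_backups : List String) : List (String × List String) :=
  let backup_dates := all_backups.map pvLastSeg
  let tmp := backup_dates.foldl (fun d item =>
      let backup_date := PySem.Str.slice item none (some 8)
      let backup_time := PySem.Str.slice item (some 8) (some 12)
      if d.contains backup_date then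
        d.modify backup_date [] (fun v => v ++ [backup_time])
      else
        d.insert backup_date [backup_time]) PySem.Dict.empty
  (tmp.items.foldl (fun o kv =>
      o.insert kv.1 (PySem.List.sorted kv.2 (fun t => t) false)) PySem.Dict.empty).items

-- ===== PORT B =====
def generate_backup_dict_alt (all_backups : List String) : List (String × List String) :=
  let items := all_backups.map pvLastSeg
  let dates := PySem.List.dedup (items.map (fun i => PySem.Str.slice i none (some 8)))
  dates.map (fun d =>
    (d, PySem.List.sorted
          ((items.filter (fun i => PySem.Str.slice i none (some 8) == d)).map
            (fun i => PySem.Str.slice i (some 8) (some 12)))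
          (fun t => t) false))

-- ===== PRECONDITION & SPEC =====
def Spec_generate_backup_dict (all_backups : List String) (out : List (String × List String)) : Prop := out = generate_backup_dict_alt all_backups
instance (all_backups : List String) (out : List (String × List String)) : Decidable (Spec_generate_backup_dict all_backups out) := by unfold Spec_generate_backup_dict; infer_instance

-- ===== CLAIM (what is proved, stated in full; the proofs are below) =====
def Claim_equal_generate_backup_dict : Prop := ∀ (all_backups : List String), Dom_generate_backup_dict all_backups → Spec_generate_backup_dict all_backups (generate_backup_dict all_backups)

-- ===== LEMMAS AND PROOFS =====

-- proof-side abbreviations for item[:8] and item[8:12]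
def pvDate (i : String) : String := PySem.Str.slice i none (some 8)
def pvTime (i : String) : String := PySem.Str.slice i (some 8) (some 12)

-- A's branch 'append to the existing list or start a new one' is exactly Dict.modify with default []
theorem pv_step_eq (d : PySem.Dict String (List String)) (k t : String) :
    (if d.contains k then d.modify k [] (fun v => v ++ [t]) else d.insert k [t])
      = d.modify k [] (fun v => v ++ [t]) := by
  by_cases h : d.contains k
  · simp [h]
  · simp only [Bool.not_eq_true] at h
    simp [h, PySem.Dict.modify, PySem.Dict.getD_of_not_contains _ _ h]

-- A's two dict passes, as a modify-loop, equal B's dedup-then-filter construction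
theorem pv_core (l : List String) :
    ((l.foldl (fun d item => d.modify (pvDate item) [] (fun v => v ++ [pvTime item])) PySem.Dict.empty).items.foldl
       (fun o kv => o.insert kv.1 (PySem.List.sorted kv.2 (fun t => t) false)) PySem.Dict.empty).items
    = (PySem.List.dedup (l.map pvDate)).map (fun d =>
        (d, PySem.List.sorted ((l.filter (fun i => pvDate i == d)).map pvTime) (fun t => t) false)) := by
  have hfold : l.foldl (fun d item => d.modify (pvDate item) [] (fun v => v ++ [pvTime item])) PySem.Dict.empty
      = (l.map (fun i => (pvDate i, pvTime i))).foldl (fun d p => d.modify p.1 [] (fun v => v ++ [p.2])) PySem.Dict.empty := by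
    rw [List.foldl_map]
  rw [hfold]
  set tmp := (l.map (fun i => (pvDate i, pvTime i))).foldl (fun d p => d.modify p.1 [] (fun v => v ++ [p.2])) PySem.Dict.empty with htmp
  clear hfold
  have hkeys : tmp.keys = PySem.List.dedup (l.map pvDate) := by
    have h := PySem.Dict.keys_foldl_modify_key (l.map (fun i => (pvDate i, pvTime i)))
      (fun p => p.1) [] (fun _ p v => v ++ [p.2]) PySem.Dict.empty
    rw [htmp]
    simpa [PySem.Set.update_nil_left, List.map_map, Function.comp_def] using h
  have hnd : tmp.keys.Nodup := by rw [hkeys]; exact PySem.List.nodup_dedup _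
  have hgetD : ∀ c, tmp.getD c [] = (l.filter (fun i => pvDate i == c)).map pvTime := by
    intro c
    rw [htmp, PySem.Dict.getD_foldl_modify_append _ PySem.Dict.empty c]
    simp [List.filter_map, List.map_map, Function.comp_def, pvTime]
  have hout : (tmp.items.foldl (fun o kv =>
        o.insert kv.1 (PySem.List.sorted kv.2 (fun t => t) false)) PySem.Dict.empty).items
      = tmp.items.map (fun kv => (kv.1, PySem.List.sorted kv.2 (fun t => t) false)) := by
    have := PySem.Dict.items_foldl_insert_fresh tmp.items (fun kv => kv.1)
      (fun kv => PySem.List.sorted kv.2 (fun t => t) false) PySem.Dict.empty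
      (by intro a _; simp [PySem.Dict.contains_empty])
      (by simpa [PySem.Dict.keys] using hnd)
    simpa using this
  rw [hout, PySem.Dict.items_eq_map_keys tmp hnd [], hkeys, List.map_map]
  refine List.map_congr_left ?_
  intro d _
  simp [hgetD d]

-- ===== VERDICT (by name: the statement is the Claim_ definition above) =====
theorem generate_backup_dict_spec : Claim_equal_generate_backup_dict := by
  intro all_backups _
  show generate_backup_dict all_backups = generate_backup_dict_alt all_backups
  unfold generate_backup_dict generate_backup_dict_alt
  simp only
  have hstep : (fun (d : PySem.Dict String (List String)) (item : String) =>
      let backup_date := PySem.Str.slice item none (some 8)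
      let backup_time := PySem.Str.slice item (some 8) (some 12)
      if d.contains backup_date then
        d.modify backup_date [] (fun v => v ++ [backup_time])
      else
        d.insert backup_date [backup_time])
      = (fun d item => d.modify (pvDate item) [] (fun v => v ++ [pvTime item])) := by
    funext d item
    simpa [pvDate, pvTime] using
      pv_step_eq d (PySem.Str.slice item none (some 8)) (PySem.Str.slice item (some 8) (some 12))
  rw [hstep]
  exact pv_core (all_backups.map pvLastSeg)
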